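-- pv_equiv track=rewrite | github.com/zhangyikaii/NJUCS-Course-Material | 计科相关外包(Outsource)/COMPSCI 753 Assignments/Assignment-2/Task-3.py | MisraGriesSummary
-- ===== SOURCE A (Python) =====
-- def MisraGriesSummary(stream, k):
--     A, subNum = {}, 0
--     for i in stream:
--         if i in A.keys():
--             A[i] += 1
--         elif len(A) < k - 1:
--             A[i] = 1
--         else:
--             subNum += len(A)
--             for j in list(A.keys()):
--                 A[j] -= 1
--                 if A[j] == 0:
--                     del A[j]
--     return A, subNum
-- ===== SOURCE B (Python) =====
-- def MisraGriesSummary(stream, k):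
--     # Stream-Summary style: store value+offset per key and bucket keys by stored
--     # value; a "decrement everything" round bumps the offset and pops one bucket.
--     A = {}        # key -> stored value s; true count = s - D
--     buckets = {}  # stored value s -> set of keys whose stored value is s
--     D = 0         # number of decrement rounds so far
--     subNum = 0
--     for i in stream:
--         if i in A:
--             s = A[i]
--             buckets[s].discard(i)
--             A[i] = s + 1
--             buckets.setdefault(s + 1, set()).add(i)
--         elif len(A) < k - 1:
--             A[i] = D + 1
--             buckets.setdefault(D + 1, set()).add(i)
--         else:
--             subNum += len(A)
--             D += 1
--             for j in buckets.pop(D, ()):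
--                 del A[j]
--     return {key: s - D for key, s in A.items()}, subNum
-- ===== Notes on version B (the rewrite author's own statement) =====
-- stated objective: alternative
-- what changed: Replaces the per-eviction scan that decrements every counter with a Stream-Summary-style scheme: counters are stored as value+global-offset and bucketed by stored value, so a decrement-all round bumps the offset and pops the single bucket of dying keys.
import Mathlib
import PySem

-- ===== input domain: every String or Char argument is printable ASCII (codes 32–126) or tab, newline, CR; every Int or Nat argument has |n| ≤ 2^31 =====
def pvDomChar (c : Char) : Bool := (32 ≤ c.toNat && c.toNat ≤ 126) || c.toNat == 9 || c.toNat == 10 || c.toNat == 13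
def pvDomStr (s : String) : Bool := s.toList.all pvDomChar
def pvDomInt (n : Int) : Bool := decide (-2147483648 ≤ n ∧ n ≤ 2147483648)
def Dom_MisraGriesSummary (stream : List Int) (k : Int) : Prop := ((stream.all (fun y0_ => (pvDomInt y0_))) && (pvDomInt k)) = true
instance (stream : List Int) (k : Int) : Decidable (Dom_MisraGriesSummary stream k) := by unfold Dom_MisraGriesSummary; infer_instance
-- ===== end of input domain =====

-- B is an alternative algorithm: instead of A's per-eviction scan that decrements
-- every counter, B stores counters as value+global offset, bucketed by stored value,
-- and a decrement-all round bumps the offset and pops one bucket.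

-- ===== PORT A =====
-- body of A's inner 'for j in list(A.keys())' loop
def pvDecStep (d : PySem.Dict Int Int) (j : Int) : PySem.Dict Int Int :=
  let d1 := d.modify j 0 (· - 1)                   -- A[j] -= 1
  if d1.getD j 0 == 0 then d1.erase j else d1      -- if A[j] == 0: del A[j]

-- body of A's 'for i in stream' loop; state = (A, subNum)
def pvStepA (k : Int) (st : PySem.Dict Int Int × Int) (i : Int) :
    PySem.Dict Int Int × Int :=
  if st.1.contains i then (st.1.modify i 0 (· + 1), st.2)
  else if (st.1.size : Int) < k - 1 then (st.1.insert i 1, st.2)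
  else
    let subNum := st.2 + (st.1.size : Int)
    (st.1.keys.foldl pvDecStep st.1, subNum)

def MisraGriesSummary (stream : List Int) (k : Int) : (List (Int × Int)) × Int :=
  let st := stream.foldl (pvStepA k) (PySem.Dict.empty, 0)
  (st.1.items, st.2)

-- ===== PORT B =====
-- B's loop state: A (key -> stored value), buckets, D, subNum
structure pvBState where
  a : PySem.Dict Int Int
  bk : PySem.Dict Int (PySem.Set Int)
  d : Int
  sub : Int
deriving Repr, DecidableEq

-- body of B's 'for i in stream' loop
def pvStepB (k : Int) (st : pvBState) (i : Int) : pvBState :=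
  if st.a.contains i then
    let s := st.a.getD i 0
    let bk1 := st.bk.insert s (PySem.Set.discard (st.bk.getD s []) i)   -- buckets[s].discard(i)
    let a1 := st.a.insert i (s + 1)                                     -- A[i] = s + 1
    let bk2 := bk1.modify (s + 1) [] (fun t => PySem.Set.add t i)       -- buckets.setdefault(s+1, set()).add(i)
    { a := a1, bk := bk2, d := st.d, sub := st.sub }
  else if (st.a.size : Int) < k - 1 then
    { a := st.a.insert i (st.d + 1),                                    -- A[i] = D + 1
      bk := st.bk.modify (st.d + 1) [] (fun t => PySem.Set.add t i),    -- buckets.setdefault(D+1, set()).add(i)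
      d := st.d, sub := st.sub }
  else
    let sub1 := st.sub + (st.a.size : Int)                              -- subNum += len(A)
    let d1 := st.d + 1                                                  -- D += 1
    let bucket := st.bk.getD d1 []                                      -- buckets.pop(D, ())
    let bk1 := st.bk.erase d1
    { a := bucket.foldl (fun t j => t.erase j) st.a,                    -- for j in …: del A[j]
      bk := bk1, d := d1, sub := sub1 }

def MisraGriesSummary_alt (stream : List Int) (k : Int) : (List (Int × Int)) × Int :=
  let st := stream.foldl (pvStepB k) ⟨PySem.Dict.empty, PySem.Dict.empty, 0, 0⟩
  (st.a.items.map (fun p => (p.1, p.2 - st.d)), st.sub)   -- {key: s - D for key, s in A.items()}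

-- ===== PRECONDITION & SPEC =====
def Spec_MisraGriesSummary (stream : List Int) (k : Int) (out : (List (Int × Int)) × Int) : Prop := out = MisraGriesSummary_alt stream k
instance (stream : List Int) (k : Int) (out : (List (Int × Int)) × Int) : Decidable (Spec_MisraGriesSummary stream k out) := by unfold Spec_MisraGriesSummary; infer_instance

-- ===== CLAIM (what is proved, stated in full; the proofs are below) =====
def Claim_equal_MisraGriesSummary : Prop := ∀ (stream : List Int) (k : Int), Dom_MisraGriesSummary stream k → Spec_MisraGriesSummary stream k (MisraGriesSummary stream k)

-- ===== LEMMAS AND PROOFS =====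

-- lookup after erase
theorem pv_get?_erase {ν : Type} (d : PySem.Dict Int ν) (x y : Int) :
    (d.erase x).get? y = if y = x then none else d.get? y := by
  obtain ⟨l⟩ := d
  simp only [PySem.Dict.erase, PySem.Dict.get?]
  induction l with
  | nil => simp
  | cons p l ih =>
    simp only [List.filter_cons, List.find?_cons]
    by_cases h1 : p.1 = x
    · rw [if_neg (by simp [h1])]
      rw [ih]
      by_cases h2 : y = x
      · simp [h2]
      · have h3 : (p.1 == y) = false := by
          rw [beq_eq_false_iff_ne, h1]
          exact fun h => h2 h.symm
        simp [h2, h3]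
    · rw [if_pos (by simp [h1])]
      by_cases h3 : p.1 = y
      · have h2 : ¬ (y = x) := fun h => h1 (by rw [h3, h])
        simp [h3, h2]
      · have h4 : (p.1 == y) = false := by simp [h3]
        rw [List.find?_cons_of_neg (by simp [h4])]
        simp only [h4]
        exact ih

-- (l.filter p).map f as a filterMap
theorem pv_map_filter {α β : Type} (p : α → Bool) (f : α → β) (l : List α) :
    (l.filter p).map f = l.filterMap (fun a => if p a then some (f a) else none) := by
  induction l with
  | nil => rfl
  | cons x xs ih => by_cases h : p x <;> simp [h, ih]

-- B's deletion loop: folding erase deletes exactly the listed keys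
theorem pvEraseLoop {ν : Type} (L : List Int) (d : PySem.Dict Int ν) :
    (L.foldl (fun t j => t.erase j) d).items =
      d.items.filter (fun p => !(L.contains p.1)) := by
  induction L generalizing d with
  | nil => simp
  | cons j L ih =>
    rw [List.foldl_cons, ih]
    simp only [PySem.Dict.erase, List.filter_filter]
    apply List.filter_congr
    intro p _
    by_cases h1 : p.1 = j <;> by_cases h2 : L.contains p.1 <;>
      simp_all

-- A's inner decrement loop, characterized on the items list
theorem pvDecLoop (ks : List Int) (d : PySem.Dict Int Int)
    (hnd : d.keys.Nodup) (hks : ks.Nodup) (hmem : ∀ j ∈ ks, d.contains j = true) :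
    (ks.foldl pvDecStep d).items =
      d.items.filterMap (fun p =>
        if p.1 ∈ ks then (if p.2 = 1 then none else some (p.1, p.2 - 1)) else some p) := by
  induction ks generalizing d with
  | nil => simp
  | cons j ks ih =>
    have hcj : d.contains j = true := hmem j List.mem_cons_self
    have hv : d.get? j = some (d.getD j 0) := by
      rcases hq : d.get? j with _ | w
      · rw [PySem.Dict.get?_eq_none_iff_contains] at hq
        rw [hq] at hcj; simp at hcj
      · simp [PySem.Dict.getD_eq_get?_getD, hq]
    set v : Int := d.getD j 0 with hvdef
    have hjit : (j, v) ∈ d.items := (PySem.Dict.get?_eq_some_iff_mem_items d j v hnd).mp hv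
    have huq : ∀ p ∈ d.items, p.1 = j → p.2 = v := by
      intro p hp he
      have hp' : (j, p.2) ∈ d.items := by rw [← he]; simpa using hp
      have h1 := PySem.Dict.get?_of_mem_items d hp' hnd
      rw [hv] at h1
      exact (Option.some_inj.mp h1).symm
    have hjks : j ∉ ks := (List.nodup_cons.mp hks).1
    have hksnd : ks.Nodup := (List.nodup_cons.mp hks).2
    have hstep : pvDecStep d j =
        (if v = 1 then (d.insert j (v - 1)).erase j else d.insert j (v - 1)) := by
      simp only [pvDecStep, PySem.Dict.modify, ← hvdef]
      rw [PySem.Dict.getD_insert_self]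
      by_cases h : v = 1
      · simp [h]
      · have : (v - 1 == 0) = false := by
          rw [beq_eq_false_iff_ne]; omega
        simp [this, h]
    rw [List.foldl_cons, hstep]
    by_cases hone : v = 1
    · rw [if_pos hone]
      have hd2 : ((d.insert j (v - 1)).erase j).items =
          d.items.filter (fun p => !(p.1 == j)) := by
        simp only [PySem.Dict.erase, PySem.Dict.items_insert_of_contains _ _ hcj]
        rw [List.filter_map]
        have h1 : ∀ p ∈ d.items,
            ((fun q : Int × Int => !(q.1 == j)) ∘
              (fun p : Int × Int => if p.1 == j then (j, v - 1) else p)) p = !(p.1 == j) := by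
          intro p _
          by_cases h : p.1 = j <;> simp [h]
        rw [List.filter_congr h1]
        conv_rhs => rw [← List.map_id (List.filter (fun p : Int × Int => !(p.1 == j)) d.items)]
        apply List.map_congr_left
        intro p hp
        have h2 := (List.mem_filter.mp hp).2
        have h3 : ¬ (p.1 = j) := by simpa using h2
        simp [h3]
      have hd2nd : ((d.insert j (v - 1)).erase j).keys.Nodup := by
        show (List.map Prod.fst _).Nodup
        rw [hd2]
        exact hnd.sublist (List.filter_sublist.map _)
      have hd2mem : ∀ j' ∈ ks, ((d.insert j (v - 1)).erase j).contains j' = true := by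
        intro j' hj'
        have hne : j' ≠ j := fun h => hjks (h ▸ hj')
        rw [PySem.Dict.contains_eq_isSome_get?, pv_get?_erase, if_neg hne,
            PySem.Dict.get?_insert, if_neg hne, ← PySem.Dict.contains_eq_isSome_get?]
        exact hmem j' (List.mem_cons_of_mem _ hj')
      rw [ih _ hd2nd hksnd hd2mem, hd2, List.filterMap_filter]
      apply List.filterMap_congr
      intro p hp
      by_cases hpj : p.1 = j
      · have hp2 : p.2 = v := huq p hp hpj
        simp [hpj, hp2, hone]
      · simp [hpj, List.mem_cons]
    · rw [if_neg hone]
      have hd1nd : (d.insert j (v - 1)).keys.Nodup := PySem.Dict.nodup_keys_insert _ _ _ hnd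
      have hd1mem : ∀ j' ∈ ks, (d.insert j (v - 1)).contains j' = true := by
        intro j' hj'
        rw [PySem.Dict.contains_eq_isSome_get?, PySem.Dict.get?_insert]
        by_cases h : j' = j
        · simp [h]
        · rw [if_neg h, ← PySem.Dict.contains_eq_isSome_get?]
          exact hmem j' (List.mem_cons_of_mem _ hj')
      rw [ih _ hd1nd hksnd hd1mem, PySem.Dict.items_insert_of_contains _ _ hcj,
          List.filterMap_map]
      apply List.filterMap_congr
      intro p hp
      by_cases hpj : p.1 = j
      · have hp2 : p.2 = v := huq p hp hpj
        simp [Function.comp, hpj, hp2, hone, hjks, List.mem_cons]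
      · simp [Function.comp, hpj, List.mem_cons]

-- the simulation invariant between the two loop states
def pvInv (sa : PySem.Dict Int Int × Int) (sb : pvBState) : Prop :=
  sa.1.items = sb.a.items.map (fun p => (p.1, p.2 - sb.d)) ∧
  sa.2 = sb.sub ∧
  sb.a.keys.Nodup ∧
  (∀ p ∈ sb.a.items, sb.d < p.2) ∧
  (∀ s j, j ∈ sb.bk.getD s [] ↔ (j, s) ∈ sb.a.items)

theorem pvInv_step (k i : Int) (sa : PySem.Dict Int Int × Int) (sb : pvBState)
    (h : pvInv sa sb) : pvInv (pvStepA k sa i) (pvStepB k sb i) := by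
  obtain ⟨hI, hS, hN, hV, hB⟩ := h
  have hkeys : sa.1.keys = sb.a.keys := by
    simp only [PySem.Dict.keys, hI, List.map_map]; rfl
  have hcont : ∀ x, sa.1.contains x = sb.a.contains x := by
    intro x
    simp only [PySem.Dict.contains, hI, List.any_map]; rfl
  have hsize : sa.1.size = sb.a.size := by
    simp only [PySem.Dict.size, hI, List.length_map]
  have huniq : ∀ p ∈ sb.a.items, ∀ v, (p.1, v) ∈ sb.a.items → p.2 = v := by
    intro p hp v hv
    have h1 := PySem.Dict.get?_of_mem_items sb.a (k := p.1) (v := p.2) (by simpa using hp) hN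
    have h2 := PySem.Dict.get?_of_mem_items sb.a hv hN
    rw [h1] at h2
    exact Option.some_inj.mp h2
  by_cases hc : sb.a.contains i = true
  · -- branch 1: i already counted
    have hgs : sb.a.get? i = some (sb.a.getD i 0) := by
      rcases hq : sb.a.get? i with _ | w
      · rw [PySem.Dict.get?_eq_none_iff_contains] at hq
        rw [hq] at hc; simp at hc
      · simp [PySem.Dict.getD_eq_get?_getD, hq]
    have hA1 : pvStepA k sa i = (sa.1.modify i 0 (· + 1), sa.2) := by
      simp [pvStepA, hcont i, hc]
    have hB1 : pvStepB k sb i =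
        { a := sb.a.insert i (sb.a.getD i 0 + 1),
          bk := (sb.bk.insert (sb.a.getD i 0)
              (PySem.Set.discard (sb.bk.getD (sb.a.getD i 0) []) i)).modify
              (sb.a.getD i 0 + 1) [] (fun t => PySem.Set.add t i),
          d := sb.d, sub := sb.sub } := by
      simp [pvStepB, hc]
    rw [hA1, hB1]
    set s : Int := sb.a.getD i 0 with hsdef
    have hmem_is : (i, s) ∈ sb.a.items :=
      (PySem.Dict.get?_eq_some_iff_mem_items sb.a i s hN).mp hgs
    have hvalA : sa.1.getD i 0 = s - sb.d := by
      have h1 : sa.1.get? i = some (s - sb.d) := by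
        apply PySem.Dict.get?_of_mem_items
        · rw [hI]; exact List.mem_map.mpr ⟨(i, s), hmem_is, rfl⟩
        · rw [hkeys]; exact hN
      simp [PySem.Dict.getD_eq_get?_getD, h1]
    have hiuniq : ∀ v, (i, v) ∈ sb.a.items → v = s := by
      intro v hv
      have h1 := PySem.Dict.get?_of_mem_items sb.a hv hN
      rw [hgs] at h1
      exact (Option.some_inj.mp h1).symm
    refine ⟨?_, hS, ?_, ?_, ?_⟩
    · -- items relation
      show (sa.1.modify i 0 (· + 1)).items = _
      simp only [PySem.Dict.modify]
      rw [hvalA,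
          PySem.Dict.items_insert_of_contains _ _ (by rw [hcont]; exact hc),
          PySem.Dict.items_insert_of_contains _ _ hc, hI, List.map_map, List.map_map]
      apply List.map_congr_left
      intro p hp
      by_cases hpi : p.1 = i
      · have h4 : s - sb.d + 1 = s + 1 - sb.d := by ring
        simp [Function.comp, hpi, h4]
      · simp [Function.comp, hpi]
    · exact PySem.Dict.nodup_keys_insert _ _ _ hN
    · intro p hp
      rcases (PySem.Dict.mem_items_insert _ _ _ _).mp hp with h1 | ⟨h1, _⟩
      · subst h1
        show sb.d < s + 1
        have := hV (i, s) hmem_is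
        simp only at this
        omega
      · exact hV p h1
    · intro s' j
      show j ∈ _ ↔ (j, s') ∈ (sb.a.insert i (s + 1)).items
      rw [PySem.Dict.getD_modify, PySem.Dict.mem_items_insert]
      by_cases h1 : s' = s + 1
      · subst h1
        rw [if_pos rfl, PySem.Dict.getD_insert, if_neg (by omega), PySem.Set.mem_add]
        constructor
        · rintro (h2 | h2)
          · have h3 := (hB (s + 1) j).mp h2
            by_cases h4 : j = i
            · subst h4
              exact absurd (hiuniq _ h3) (by omega)
            · exact Or.inr ⟨h3, h4⟩
          · subst h2; exact Or.inl rfl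
        · rintro (h2 | ⟨h2, h3⟩)
          · exact Or.inr (Prod.ext_iff.mp h2).1
          · exact Or.inl ((hB (s + 1) j).mpr h2)
      · rw [if_neg h1, PySem.Dict.getD_insert]
        by_cases h2 : s' = s
        · subst h2
          rw [if_pos rfl, PySem.Set.mem_discard]
          constructor
          · rintro ⟨h3, h4⟩
            exact Or.inr ⟨(hB s j).mp h3, h4⟩
          · rintro (h3 | ⟨h3, h4⟩)
            · exact absurd (Prod.ext_iff.mp h3).2 (by omega)
            · exact ⟨(hB s j).mpr h3, h4⟩
        · rw [if_neg h2]
          constructor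
          · intro h3
            have h4 := (hB s' j).mp h3
            have h5 : j ≠ i := by
              intro h6; subst h6; exact h2 (hiuniq _ h4)
            exact Or.inr ⟨h4, h5⟩
          · rintro (h3 | ⟨h3, _⟩)
            · exact absurd (Prod.ext_iff.mp h3).2 h1
            · exact (hB s' j).mpr h3
  · have hc' : sb.a.contains i = false := by simpa using hc
    have hnm : ∀ v, (i, v) ∉ sb.a.items := by
      intro v hv
      have h1 : i ∈ sb.a.keys := List.mem_map.mpr ⟨(i, v), hv, rfl⟩
      exact hc ((PySem.Dict.contains_iff_mem_keys _ _).mpr h1)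
    by_cases hsz : (sb.a.size : Int) < k - 1
    · -- branch 2: fresh key
      have hA2 : pvStepA k sa i = (sa.1.insert i 1, sa.2) := by
        simp [pvStepA, hcont i, hc', hsize, hsz]
      have hB2 : pvStepB k sb i =
          { a := sb.a.insert i (sb.d + 1),
            bk := sb.bk.modify (sb.d + 1) [] (fun t => PySem.Set.add t i),
            d := sb.d, sub := sb.sub } := by
        simp [pvStepB, hc', hsz]
      rw [hA2, hB2]
      refine ⟨?_, hS, ?_, ?_, ?_⟩
      · show (sa.1.insert i 1).items = _
        rw [PySem.Dict.items_insert_of_not_contains _ _ (by rw [hcont]; exact hc'),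
            PySem.Dict.items_insert_of_not_contains _ _ hc', hI, List.map_append]
        simp
      · exact PySem.Dict.nodup_keys_insert _ _ _ hN
      · intro p hp
        rcases (PySem.Dict.mem_items_insert _ _ _ _).mp hp with h1 | ⟨h1, _⟩
        · subst h1
          show sb.d < sb.d + 1
          omega
        · exact hV p h1
      · intro s' j
        show j ∈ _ ↔ (j, s') ∈ (sb.a.insert i (sb.d + 1)).items
        rw [PySem.Dict.getD_modify, PySem.Dict.mem_items_insert]
        by_cases h1 : s' = sb.d + 1
        · subst h1
          rw [if_pos rfl, PySem.Set.mem_add]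
          constructor
          · rintro (h2 | h2)
            · have h3 := (hB _ j).mp h2
              refine Or.inr ⟨h3, ?_⟩
              intro h4; subst h4; exact hnm _ h3
            · subst h2; exact Or.inl rfl
          · rintro (h2 | ⟨h2, _⟩)
            · exact Or.inr (Prod.ext_iff.mp h2).1
            · exact Or.inl ((hB _ j).mpr h2)
        · rw [if_neg h1]
          constructor
          · intro h2
            have h3 := (hB s' j).mp h2
            refine Or.inr ⟨h3, ?_⟩
            intro h4; subst h4; exact hnm _ h3
          · rintro (h2 | ⟨h2, _⟩)
            · exact absurd (Prod.ext_iff.mp h2).2 h1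
            · exact (hB s' j).mpr h2
    · -- branch 3: decrement round
      have hA3 : pvStepA k sa i =
          (sa.1.keys.foldl pvDecStep sa.1, sa.2 + (sa.1.size : Int)) := by
        simp [pvStepA, hcont i, hc', hsize, hsz]
      have hB3 : pvStepB k sb i =
          { a := (sb.bk.getD (sb.d + 1) []).foldl (fun t j => t.erase j) sb.a,
            bk := sb.bk.erase (sb.d + 1),
            d := sb.d + 1,
            sub := sb.sub + (sb.a.size : Int) } := by
        simp [pvStepB, hc', hsz]
      rw [hA3, hB3]
      have hksnd : sa.1.keys.Nodup := by rw [hkeys]; exact hN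
      have hdec := pvDecLoop sa.1.keys sa.1 hksnd hksnd
        (fun j hj => (PySem.Dict.contains_iff_mem_keys _ _).mpr hj)
      have hbmem : ∀ j, j ∈ sb.bk.getD (sb.d + 1) [] ↔ (j, sb.d + 1) ∈ sb.a.items :=
        fun j => hB (sb.d + 1) j
      have herase := pvEraseLoop (sb.bk.getD (sb.d + 1) []) sb.a
      have hfilt : sb.a.items.filter
            (fun p => !(List.contains (sb.bk.getD (sb.d + 1) []) p.1)) =
          sb.a.items.filter (fun p => !(p.2 == sb.d + 1)) := by
        apply List.filter_congr
        intro p hp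
        have hbc : (List.contains (sb.bk.getD (sb.d + 1) []) p.1) = (p.2 == sb.d + 1) := by
          rw [Bool.eq_iff_iff, List.contains_iff_mem, beq_iff_eq]
          constructor
          · intro h2
            exact huniq p hp _ ((hbmem p.1).mp h2)
          · intro h2
            exact (hbmem p.1).mpr (by rw [← h2]; simpa using hp)
        rw [hbc]
      refine ⟨?_, ?_, ?_, ?_, ?_⟩
      · -- items relation
        show (sa.1.keys.foldl pvDecStep sa.1).items =
          ((sb.bk.getD (sb.d + 1) []).foldl (fun t j => t.erase j) sb.a).items.map
            (fun p => (p.1, p.2 - (sb.d + 1)))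
        rw [hdec, herase, hfilt, hI, List.filterMap_map, pv_map_filter]
        apply List.filterMap_congr
        intro p hp
        have hpd := hV p hp
        have hpk : p.1 ∈ sa.1.keys := by
          rw [hkeys]; exact List.mem_map.mpr ⟨p, hp, rfl⟩
        by_cases h1 : p.2 = sb.d + 1
        · have h2 : p.2 - sb.d = 1 := by omega
          simp [Function.comp, hpk, h1]
        · have h2 : ¬ (p.2 - sb.d = 1) := by omega
          have h3 : (p.2 == sb.d + 1) = false := by
            rw [beq_eq_false_iff_ne]; exact h1
          have h4 : p.2 - sb.d - 1 = p.2 - (sb.d + 1) := by ring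
          simp [Function.comp, hpk, h2, h3, h4]
      · show sa.2 + (sa.1.size : Int) = sb.sub + (sb.a.size : Int)
        rw [hS, hsize]
      · show (List.map Prod.fst _).Nodup
        rw [herase]
        exact hN.sublist (List.filter_sublist.map _)
      · intro p hp
        show sb.d + 1 < p.2
        have hp' : p ∈ ((sb.bk.getD (sb.d + 1) []).foldl (fun t j => t.erase j) sb.a).items := hp
        rw [herase, hfilt] at hp'
        rcases List.mem_filter.mp hp' with ⟨h1, h2⟩
        have h3 := hV p h1
        have h4 : ¬ (p.2 = sb.d + 1) := by simpa using h2
        omega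
      · intro s' j
        show j ∈ (sb.bk.erase (sb.d + 1)).getD s' [] ↔
          (j, s') ∈ ((sb.bk.getD (sb.d + 1) []).foldl (fun t j => t.erase j) sb.a).items
        rw [herase, hfilt]
        have hgd : (sb.bk.erase (sb.d + 1)).getD s' [] =
            if s' = sb.d + 1 then [] else sb.bk.getD s' [] := by
          rw [PySem.Dict.getD_eq_get?_getD, pv_get?_erase]
          by_cases h1 : s' = sb.d + 1 <;> simp [h1, PySem.Dict.getD_eq_get?_getD]
        rw [hgd]
        by_cases h1 : s' = sb.d + 1
        · subst h1
          rw [if_pos rfl]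
          simp only [List.not_mem_nil, false_iff]
          intro h2
          have h3 := (List.mem_filter.mp h2).2
          simp at h3
        · rw [if_neg h1]
          constructor
          · intro h2
            refine List.mem_filter.mpr ⟨(hB s' j).mp h2, ?_⟩
            simpa using h1
          · intro h2
            exact (hB s' j).mpr (List.mem_filter.mp h2).1

theorem pvInv_init :
    pvInv (PySem.Dict.empty, 0) ⟨PySem.Dict.empty, PySem.Dict.empty, 0, 0⟩ := by
  refine ⟨by simp [PySem.Dict.empty], rfl, ?_, ?_, ?_⟩
  · exact PySem.Dict.nodup_keys_empty
  · intro p hp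
    simp [PySem.Dict.empty] at hp
  · intro s j
    simp [PySem.Dict.getD_eq_get?_getD, PySem.Dict.get?, PySem.Dict.empty]

theorem pvInv_foldl (k : Int) (stream : List Int) :
    ∀ (sa : PySem.Dict Int Int × Int) (sb : pvBState), pvInv sa sb →
      pvInv (stream.foldl (pvStepA k) sa) (stream.foldl (pvStepB k) sb) := by
  induction stream with
  | nil => intro sa sb h; exact h
  | cons x xs ih =>
    intro sa sb h
    simp only [List.foldl_cons]
    exact ih _ _ (pvInv_step k x sa sb h)

-- ===== VERDICT (by name: the statement is the Claim_ definition above) =====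
theorem MisraGriesSummary_spec : Claim_equal_MisraGriesSummary := by
  intro stream k _
  unfold Spec_MisraGriesSummary MisraGriesSummary MisraGriesSummary_alt
  obtain ⟨h1, h2, -, -, -⟩ := pvInv_foldl k stream _ _ pvInv_init
  simp only [h1, h2]
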